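-- pv_equiv track=rewrite | github.com/VattamBhavaniPrasad5i5/LeetCode | 2610-convert-an-array-into-a-2d-array-with-conditions/2610-convert-an-array-into-a-2d-array-with-conditions.py | findMatrix
-- ===== SOURCE A (Python) =====
-- from typing import List
--
-- def findMatrix(nums: List[int]) -> List[List[int]]:
--     count_nums = {}
--     ans = []
--
--     for num in nums:
--         if num not in count_nums:
--             count_nums[num] = 0
--
--         idx = count_nums[num]
--
--         if idx == len(ans):
--             ans.append([])
--
--         ans[idx].append(num)
--
--         count_nums[num] += 1
--
--     return ans
-- ===== SOURCE B (Python) =====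
-- from typing import List
--
-- def findMatrix(nums: List[int]) -> List[List[int]]:
--     ans = []
--     for num in nums:
--         for row in ans:
--             if num not in row:
--                 row.append(num)
--                 break
--         else:
--             ans.append([num])
--     return ans
-- ===== Notes on version B (the rewrite author's own statement) =====
-- stated objective: idiomatic
-- what changed: Drops the occurrence-count dict entirely: each number is appended to the first existing row that does not already contain it (scanning the rows), or starts a new row.
import Mathlib
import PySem

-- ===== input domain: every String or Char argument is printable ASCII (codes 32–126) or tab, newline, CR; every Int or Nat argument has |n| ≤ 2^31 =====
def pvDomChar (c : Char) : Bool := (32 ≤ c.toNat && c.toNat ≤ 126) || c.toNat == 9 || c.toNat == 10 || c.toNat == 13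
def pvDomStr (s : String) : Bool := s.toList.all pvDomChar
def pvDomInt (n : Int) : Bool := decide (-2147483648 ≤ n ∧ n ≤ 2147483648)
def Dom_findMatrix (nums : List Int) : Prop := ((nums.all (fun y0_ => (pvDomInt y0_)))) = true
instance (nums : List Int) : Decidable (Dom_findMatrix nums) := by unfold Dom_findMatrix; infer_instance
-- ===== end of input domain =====

-- B drops A's occurrence-count dict: each number goes to the first existing row not
-- already containing it (or a new row); same return value, no speed claim.

-- ===== PORT A =====
-- one iteration of A's loop over `nums`; state = (count_nums, ans)
def pvStepA (st : PySem.Dict Int Int × List (List Int)) (num : Int) :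
    PySem.Dict Int Int × List (List Int) :=
  let d := if st.1.contains num then st.1 else st.1.insert num 0   -- if num not in count_nums: count_nums[num] = 0
  let idx := d.getD num 0                                          -- idx = count_nums[num]
  let ans := if idx == (st.2.length : Int) then st.2 ++ [[]] else st.2
  -- ans[idx].append(num): idx is a nonnegative in-range index in every reachable state, so .toNat is exact
  let ans := ans.modify idx.toNat (fun r => r ++ [num])
  (d.insert num (idx + 1), ans)                                    -- count_nums[num] += 1

def findMatrix (nums : List Int) : List (List Int) :=
  (nums.foldl pvStepA (PySem.Dict.empty, [])).2

-- ===== PORT B =====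
-- place `num` into the first row that does not contain it, else start a new row
def pvPlace (rows : List (List Int)) (num : Int) : List (List Int) :=
  match rows with
  | [] => [[num]]
  | r :: rs => if r.contains num then r :: pvPlace rs num else (r ++ [num]) :: rs

def findMatrix_alt (nums : List Int) : List (List Int) :=
  nums.foldl pvPlace []

-- ===== PRECONDITION & SPEC =====
def Spec_findMatrix (nums : List Int) (out : List (List Int)) : Prop := out = findMatrix_alt nums
instance (nums : List Int) (out : List (List Int)) : Decidable (Spec_findMatrix nums out) := by unfold Spec_findMatrix; infer_instance

-- ===== CLAIM (what is proved, stated in full; the proofs are below) =====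
def Claim_equal_findMatrix : Prop := ∀ (nums : List Int), Dom_findMatrix nums → Spec_findMatrix nums (findMatrix nums)

-- ===== LEMMAS AND PROOFS =====

-- Invariant of A's loop state: count_nums[v] is between 0 and len(ans), and row i
-- contains v exactly when i < count_nums[v].
def pvInv (d : PySem.Dict Int Int) (ans : List (List Int)) : Prop :=
  ∀ v : Int, 0 ≤ d.getD v 0 ∧ d.getD v 0 ≤ (ans.length : Int) ∧
    ∀ i : Nat, i < ans.length → (v ∈ ans.getD i [] ↔ (i : Int) < d.getD v 0)

theorem pvGetD_if_contains (d : PySem.Dict Int Int) (num v : Int) :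
    (if d.contains num then d else d.insert num 0).getD v 0 = d.getD v 0 := by
  split
  · rfl
  · rcases eq_or_ne v num with rfl | hne
    · rename_i h
      rw [PySem.Dict.getD_insert_self]
      simp only [PySem.Dict.getD]
      rw [(PySem.Dict.get?_eq_none_iff_contains d v).2 (by simpa using h)]
      rfl
    · rw [PySem.Dict.getD_insert_of_ne _ _ _ hne]

theorem pvGetD_modify {α : Type} (l : List α) (k : Nat) (f : α → α) (i : Nat) (dflt : α) :
    (l.modify k f).getD i dflt =
      if i = k ∧ i < l.length then f (l.getD i dflt) else l.getD i dflt := by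
  induction l generalizing k i with
  | nil => simp [List.modify]
  | cons a t ih =>
    cases k with
    | zero =>
      cases i with
      | zero => simp
      | succ j => simp
    | succ m =>
      cases i with
      | zero => simp
      | succ j =>
        simp only [List.modify_succ_cons, List.getD_cons_succ, List.length_cons, ih]
        by_cases h : j = m ∧ j < t.length
        · simp [h.1]
        · have : ¬(j + 1 = m + 1 ∧ j + 1 < t.length + 1) := by omega
          simp only [if_neg h, if_neg this]

theorem pvModify_append_singleton {α : Type} (l : List α) (x : α) (f : α → α) :
    (l ++ [x]).modify l.length f = l ++ [f x] := by
  induction l with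
  | nil => simp [List.modify]
  | cons a t ih => simpa using ih

theorem pvPlace_all (rows : List (List Int)) (num : Int)
    (h : ∀ i, i < rows.length → num ∈ rows.getD i []) :
    pvPlace rows num = rows ++ [[num]] := by
  induction rows with
  | nil => rfl
  | cons r rs ih =>
    have h0 : r.contains num = true := by simpa using h 0 (by simp)
    simp only [pvPlace, if_pos h0]
    rw [ih (fun i hi => by simpa using h (i + 1) (by simpa using hi))]
    rfl

theorem pvPlace_at (rows : List (List Int)) (num : Int) (k : Nat)
    (hk : k < rows.length)
    (hb : ∀ i, i < k → num ∈ rows.getD i [])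
    (ha : num ∉ rows.getD k []) :
    pvPlace rows num = rows.modify k (fun r => r ++ [num]) := by
  induction rows generalizing k with
  | nil => simp at hk
  | cons r rs ih =>
    cases k with
    | zero =>
      have : num ∉ r := by simpa using ha
      simp [pvPlace, this]
    | succ m =>
      have h0 : r.contains num = true := by simpa using hb 0 (by omega)
      simp only [pvPlace, List.modify_succ_cons, if_pos h0]
      rw [ih m (by simpa using hk)
        (fun i hi => by simpa using hb (i + 1) (by omega))
        (by simpa using ha)]

theorem pvGetD_append_last {α : Type} (l : List α) (x dflt : α) :
    (l ++ [x]).getD l.length dflt = x := by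
  induction l with
  | nil => rfl
  | cons a t ih => simpa using ih

theorem pvStep_main (d : PySem.Dict Int Int) (ans : List (List Int)) (num : Int)
    (h : pvInv d ans) :
    (pvStepA (d, ans) num).2 = pvPlace ans num ∧
    pvInv (pvStepA (d, ans) num).1 (pvStepA (d, ans) num).2 := by
  obtain ⟨hc0, hcle, hmem⟩ := h num
  set c : Int := d.getD num 0 with hc
  set k : Nat := c.toNat with hk
  have hck : c = (k : Int) := (Int.toNat_of_nonneg hc0).symm
  simp only [pvStepA, pvGetD_if_contains, ← hc]
  by_cases hfull : c = (ans.length : Int)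
  · -- every row contains num: a fresh row is appended
    have hkl : k = ans.length := by omega
    have hall : ∀ i, i < ans.length → num ∈ ans.getD i [] := by
      intro i hi
      exact (hmem i hi).2 (by omega)
    rw [if_pos (by simpa using hfull)]
    have hA : (ans ++ [[]]).modify k (fun r => r ++ [num]) = ans ++ [[num]] := by
      rw [hkl, pvModify_append_singleton]; simp
    rw [hA]
    refine ⟨(pvPlace_all ans num hall).symm, ?_⟩
    intro v
    rcases eq_or_ne v num with rfl | hv
    · rw [PySem.Dict.getD_insert_self]
      refine ⟨by omega, by simp; omega, ?_⟩
      intro i hi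
      simp only [List.length_append, List.length_cons, List.length_nil] at hi
      by_cases hil : i < ans.length
      · rw [List.getD_append _ _ _ _ hil]
        exact ⟨fun _ => by omega, fun _ => hall i hil⟩
      · have hieq : i = ans.length := by omega
        subst hieq
        rw [pvGetD_append_last]
        simp; omega
    · rw [PySem.Dict.getD_insert_of_ne _ _ _ hv, pvGetD_if_contains]
      obtain ⟨h0, hle, hm⟩ := h v
      refine ⟨h0, by simp; omega, ?_⟩
      intro i hi
      simp only [List.length_append, List.length_cons, List.length_nil] at hi
      by_cases hil : i < ans.length
      · rw [List.getD_append _ _ _ _ hil]; exact hm i hil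
      · have hieq : i = ans.length := by omega
        subst hieq
        rw [pvGetD_append_last]
        simp only [List.mem_cons, List.not_mem_nil, or_false]
        exact ⟨fun e => absurd e hv, fun hlt => by omega⟩
  · -- row k is the first row without num
    have hkl : k < ans.length := by omega
    rw [if_neg (by simpa using hfull)]
    have hb : ∀ i, i < k → num ∈ ans.getD i [] := by
      intro i hi
      exact (hmem i (by omega)).2 (by omega)
    have ha : num ∉ ans.getD k [] := by
      intro hmem'
      have := (hmem k hkl).1 hmem'
      omega
    refine ⟨(pvPlace_at ans num k hkl hb ha).symm, ?_⟩
    intro v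
    have hlen : (ans.modify k (fun r => r ++ [num])).length = ans.length := by simp
    rcases eq_or_ne v num with rfl | hv
    · rw [PySem.Dict.getD_insert_self]
      refine ⟨by omega, by rw [hlen]; omega, ?_⟩
      intro i hi
      rw [hlen] at hi
      rw [pvGetD_modify]
      by_cases hik : i = k
      · subst hik
        rw [if_pos ⟨rfl, hi⟩]
        simp; omega
      · rw [if_neg (fun hx => hik hx.1), hmem i hi]
        omega
    · rw [PySem.Dict.getD_insert_of_ne _ _ _ hv, pvGetD_if_contains]
      obtain ⟨h0, hle, hm⟩ := h v
      refine ⟨h0, by rw [hlen]; omega, ?_⟩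
      intro i hi
      rw [hlen] at hi
      rw [pvGetD_modify]
      by_cases hik : i = k
      · subst hik
        rw [if_pos ⟨rfl, hi⟩]
        have hmm : v ∈ ans.getD k [] ++ [num] ↔ v ∈ ans.getD k [] := by simp [hv]
        rw [hmm]; exact hm k hi
      · rw [if_neg (fun hx => hik hx.1)]; exact hm i hi

theorem pvFoldl_agree (nums : List Int) :
    ∀ (d : PySem.Dict Int Int) (ans : List (List Int)), pvInv d ans →
      (nums.foldl pvStepA (d, ans)).2 = nums.foldl pvPlace ans := by
  induction nums with
  | nil => intro d ans _; rfl
  | cons n ns ih =>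
    intro d ans h
    obtain ⟨heq, hinv⟩ := pvStep_main d ans n h
    simp only [List.foldl_cons]
    rw [show pvStepA (d, ans) n = ((pvStepA (d, ans) n).1, (pvStepA (d, ans) n).2) from rfl,
        ih _ _ hinv, heq]

theorem pvInv_init : pvInv PySem.Dict.empty [] := by
  intro v
  refine ⟨by simp [PySem.Dict.getD, PySem.Dict.get?, PySem.Dict.empty],
          by simp [PySem.Dict.getD, PySem.Dict.get?, PySem.Dict.empty], ?_⟩
  intro i hi
  simp at hi

-- ===== VERDICT (by name: the statement is the Claim_ definition above) =====
theorem findMatrix_spec : Claim_equal_findMatrix := by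
  intro nums _
  unfold Spec_findMatrix findMatrix findMatrix_alt
  exact pvFoldl_agree nums _ _ pvInv_init
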